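-- pv_equiv track=rewrite | github.com/pypi-data/pypi-mirror-372 | packages/dexray-insight/dexray_insight-1.0.0.1-py3-none-any.whl/dexray_insight/security/broken_access_control_assessment.py | _is_risky_intent_filter
-- ===== SOURCE A (Python) =====
-- def _is_risky_intent_filter(filters) -> bool:
--     """Check if intent filters pose access control risks"""
--     # This is a simplified check - in a real implementation,
--     # you would parse the actual intent filter structure
--
--     risky_actions = [
--         "android.intent.action.BOOT_COMPLETED",
--         "android.intent.action.PACKAGE_INSTALL",
--         "android.intent.action.PACKAGE_REMOVED",
--         "android.provider.Telephony.SMS_RECEIVED",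
--         "android.intent.action.PHONE_STATE",
--     ]
--
--     if isinstance(filters, list):
--         for filter_item in filters:
--             if isinstance(filter_item, str):
--                 for risky_action in risky_actions:
--                     if risky_action in filter_item:
--                         return True
--
--     return False
-- ===== SOURCE B (Python) =====
-- def _is_risky_intent_filter(filters) -> bool:
--     """Check if intent filters pose access control risks"""
--     risky_actions = [
--         "android.intent.action.BOOT_COMPLETED",
--         "android.intent.action.PACKAGE_INSTALL",
--         "android.intent.action.PACKAGE_REMOVED",
--         "android.provider.Telephony.SMS_RECEIVED",
--         "android.intent.action.PHONE_STATE",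
--     ]
--     if not isinstance(filters, list):
--         return False
--     # One newline-joined blob; no risky action contains a newline, so a
--     # match in the blob is exactly a match inside one filter string.
--     blob = "\n".join(f for f in filters if isinstance(f, str))
--     return any(action in blob for action in risky_actions)
-- ===== Notes on version B (the rewrite author's own statement) =====
-- stated objective: faster
-- what changed: Instead of nested Python-level loops checking each of the 5 risky actions against each filter string, B joins all filter strings into one newline-separated blob (no risky action contains a newline) and does a single C-level substring search per action over the blob.
import Mathlib
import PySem

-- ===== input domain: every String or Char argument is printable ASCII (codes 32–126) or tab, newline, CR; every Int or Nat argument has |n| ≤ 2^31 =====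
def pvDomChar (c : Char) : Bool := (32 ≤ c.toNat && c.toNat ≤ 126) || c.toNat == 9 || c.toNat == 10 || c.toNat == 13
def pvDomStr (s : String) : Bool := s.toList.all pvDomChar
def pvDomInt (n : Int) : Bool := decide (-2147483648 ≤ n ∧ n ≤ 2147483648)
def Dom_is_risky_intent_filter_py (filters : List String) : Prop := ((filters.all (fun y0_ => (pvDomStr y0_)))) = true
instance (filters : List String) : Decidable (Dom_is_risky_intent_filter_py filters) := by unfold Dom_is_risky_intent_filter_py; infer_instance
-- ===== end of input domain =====

-- B replaces A's nested per-filter/per-action substring loops by joining all filters into one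
-- newline-separated blob and doing one substring search per risky action (alternative decomposition).


-- ===== PORT A =====
def riskyActionsA : List String :=
  ["android.intent.action.BOOT_COMPLETED",
   "android.intent.action.PACKAGE_INSTALL",
   "android.intent.action.PACKAGE_REMOVED",
   "android.provider.Telephony.SMS_RECEIVED",
   "android.intent.action.PHONE_STATE"]

-- inner 'for risky_action in risky_actions: if risky_action in filter_item: return True'
def aInnerLoop (filter_item : String) : List String → Bool
  | [] => false
  | risky_action :: rest =>
      if PySem.Str.isIn risky_action filter_item then true else aInnerLoop filter_item rest

-- outer 'for filter_item in filters' (the isinstance(filters, list) / isinstance(filter_item, str)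
-- guards are always true at type List String)
def aOuterLoop : List String → Bool
  | [] => false
  | filter_item :: rest =>
      if aInnerLoop filter_item riskyActionsA then true else aOuterLoop rest

def is_risky_intent_filter_py (filters : List String) : Bool := aOuterLoop filters

-- ===== PORT B =====
def riskyActionsB : List String :=
  ["android.intent.action.BOOT_COMPLETED",
   "android.intent.action.PACKAGE_INSTALL",
   "android.intent.action.PACKAGE_REMOVED",
   "android.provider.Telephony.SMS_RECEIVED",
   "android.intent.action.PHONE_STATE"]

def is_risky_intent_filter_py_alt (filters : List String) : Bool :=
  let blob := PySem.Str.join "\n" filters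
  riskyActionsB.any (fun action => PySem.Str.isIn action blob)

-- ===== PRECONDITION & SPEC =====
def Spec_is_risky_intent_filter_py (filters : List String) (out : Bool) : Prop := out = is_risky_intent_filter_py_alt filters
instance (filters : List String) (out : Bool) : Decidable (Spec_is_risky_intent_filter_py filters out) := by unfold Spec_is_risky_intent_filter_py; infer_instance

-- ===== CLAIM (what is proved, stated in full; the proofs are below) =====
def Claim_equal_is_risky_intent_filter_py : Prop := ∀ (filters : List String), Dom_is_risky_intent_filter_py filters → Spec_is_risky_intent_filter_py filters (is_risky_intent_filter_py filters)

-- ===== LEMMAS AND PROOFS =====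

theorem prefix_split {α : Type} (sep : α) (a u v : List α) (hsep : sep ∉ a)
    (h : a <+: u ++ sep :: v) : a <+: u := by
  by_cases hl : a.length ≤ u.length
  · exact List.prefix_of_prefix_length_le h (List.prefix_append u (sep :: v)) hl
  · exfalso
    push Not at hl
    have := h.getElem (i := u.length) hl
    rw [List.getElem_append_right (le_refl u.length)] at this
    simp at this
    exact hsep (this ▸ List.getElem_mem hl)

theorem infix_split {α : Type} (sep : α) (a u v : List α) (hsep : sep ∉ a) :
    a <:+: u ++ sep :: v ↔ a <:+: u ∨ a <:+: v := by
  constructor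
  · rintro ⟨p, q, hpq⟩
    have hdrop : a <+: (u ++ sep :: v).drop p.length := by
      rw [← hpq]; simp
    by_cases hp : p.length ≤ u.length
    · rw [List.drop_append_of_le_length hp] at hdrop
      exact Or.inl ((prefix_split sep a _ v hsep hdrop).isInfix.trans (List.drop_suffix _ _).isInfix)
    · push Not at hp
      rw [List.drop_append] at hdrop
      have h0 : (sep :: v).drop (p.length - u.length) = v.drop (p.length - u.length - 1) := by
        have : p.length - u.length = (p.length - u.length - 1) + 1 := by omega
        rw [this]; simp
      rw [List.drop_eq_nil_of_le (by omega), List.nil_append, h0] at hdrop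
      exact Or.inr (hdrop.isInfix.trans (List.drop_suffix _ _).isInfix)
  · rintro (h | h)
    · exact h.trans ((List.prefix_append u (sep :: v)).isInfix)
    · exact h.trans ((List.suffix_cons sep v).isInfix.trans (List.suffix_append u (sep :: v)).isInfix)

-- a newline-free nonempty pattern occurs in the '\n'-joined blob iff it occurs in one of the parts
theorem isIn_join (a : List Char) (ha : a ≠ []) (hsep : '\n' ∉ a) (L : List (List Char)) :
    PySem.Chars.isIn a (PySem.Chars.join ['\n'] L) = L.any (fun s => PySem.Chars.isIn a s) := by
  induction L with
  | nil =>
    simp [PySem.Chars.join_nil]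
    rw [PySem.Chars.isIn_eq_false_iff]
    intro h
    exact ha (List.eq_nil_of_infix_nil h)
  | cons x t ih =>
    cases t with
    | nil => simp [PySem.Chars.join_singleton]
    | cons y t' =>
      rw [PySem.Chars.join_cons_cons]
      rw [Bool.eq_iff_iff, PySem.Chars.isIn_iff_infix]
      have hx : x ++ ['\n'] ++ PySem.Chars.join ['\n'] (y :: t') = x ++ '\n' :: PySem.Chars.join ['\n'] (y :: t') := by simp
      rw [hx, infix_split _ a _ _ hsep]
      simp [← PySem.Chars.isIn_iff_infix, ← ih]

theorem aInner_eq (f : String) (l : List String) :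
    aInnerLoop f l = l.any (fun a => PySem.Str.isIn a f) := by
  induction l with
  | nil => rfl
  | cons a rest ih => simp only [aInnerLoop, ih, List.any_cons]; split_ifs <;> simp_all

theorem aOuter_eq (L : List String) :
    aOuterLoop L = L.any (fun f => aInnerLoop f riskyActionsA) := by
  induction L with
  | nil => rfl
  | cons f rest ih => simp only [aOuterLoop, ih, List.any_cons]; split_ifs <;> simp_all

theorem any_swap {α β : Type} (L : List α) (M : List β) (p : α → β → Bool) :
    L.any (fun x => M.any (fun y => p x y)) = M.any (fun y => L.any (fun x => p x y)) := by
  rw [Bool.eq_iff_iff]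
  simp only [List.any_eq_true]
  exact ⟨fun ⟨x, hx, y, hy, h⟩ => ⟨y, hy, x, hx, h⟩, fun ⟨y, hy, x, hx, h⟩ => ⟨x, hx, y, hy, h⟩⟩

theorem b_join_eval (filters acts : List String)
    (h1 : ∀ a ∈ acts, a.toList ≠ [] ∧ '\n' ∉ a.toList) :
    acts.any (fun a => PySem.Str.isIn a (PySem.Str.join "\n" filters)) =
      acts.any (fun a => filters.any (fun f => PySem.Str.isIn a f)) := by
  induction acts with
  | nil => rfl
  | cons a rest ih =>
    obtain ⟨ha, hsep⟩ := h1 a (List.mem_cons_self)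
    have hrest := fun b hb => h1 b (List.mem_cons_of_mem a hb)
    simp only [List.any_cons, ih hrest]
    congr 1
    have : PySem.Str.isIn a (PySem.Str.join "\n" filters)
        = PySem.Chars.isIn a.toList (PySem.Chars.join ['\n'] (filters.map String.toList)) := by
      rw [PySem.Str.isIn_eq, PySem.Str.toList_join]; rfl
    rw [this, isIn_join a.toList ha hsep, List.any_map]
    rfl

-- ===== VERDICT (by name: the statement is the Claim_ definition above) =====
theorem is_risky_intent_filter_py_spec : Claim_equal_is_risky_intent_filter_py := by
  intro filters _
  unfold Spec_is_risky_intent_filter_py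
  show aOuterLoop filters = _
  rw [aOuter_eq]
  simp only [aInner_eq]
  unfold is_risky_intent_filter_py_alt
  rw [b_join_eval filters riskyActionsB (by decide)]
  rw [any_swap]
  rfl
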